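-- pv_equiv track=rewrite | github.com/ST4RKJR/Js- | Assignment/arrayindexing.py | count_valid
-- ===== SOURCE A (Python) =====
-- def count_valid(n,arr):
--     total_sum = sum(arr)
--     left_sum = 0
--     count = 0
--     for i in range(n):
--         right_sum = total_sum - left_sum - arr[i]
--         if left_sum >= right_sum:
--             count+=1
--         left_sum+= arr[i]
--     return count
-- ===== SOURCE B (Python) =====
-- def count_valid(n, arr):
--     total = sum(arr)
--     return sum(1 for i in range(n) if 2 * sum(arr[:i]) + arr[i] >= total)
-- ===== Notes on version B (the rewrite author's own statement) =====
-- stated objective: alternative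
-- what changed: Replaces A's single running-sum loop with a filtered generator sum that recomputes each prefix sum from scratch and rearranges the comparison to 2*left + arr[i] >= total.
import Mathlib
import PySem

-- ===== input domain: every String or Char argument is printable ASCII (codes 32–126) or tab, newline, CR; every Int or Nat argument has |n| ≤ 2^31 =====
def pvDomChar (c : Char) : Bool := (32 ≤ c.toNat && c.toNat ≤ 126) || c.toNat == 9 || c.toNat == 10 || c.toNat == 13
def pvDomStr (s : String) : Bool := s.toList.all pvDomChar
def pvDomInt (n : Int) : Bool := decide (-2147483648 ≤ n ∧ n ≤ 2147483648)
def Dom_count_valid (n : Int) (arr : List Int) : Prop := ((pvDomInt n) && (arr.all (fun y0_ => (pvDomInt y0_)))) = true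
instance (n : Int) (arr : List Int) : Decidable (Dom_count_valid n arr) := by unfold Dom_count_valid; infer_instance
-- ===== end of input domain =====

-- B recomputes each prefix sum from scratch inside a filtered generator sum (comparison
-- rearranged to 2*left + arr[i] >= total), instead of A's single running-sum loop; alternative shape, not faster.

-- ===== PORT A =====
def count_valid (n : Int) (arr : List Int) : Int :=
  let total_sum := arr.sum
  let st := (PySem.List.pyRange 0 n 1).foldl
    (fun (s : Int × Int) i =>
      let x := PySem.List.pyGetD arr i 0
      let right_sum := total_sum - s.1 - x
      let count := if s.1 ≥ right_sum then s.2 + 1 else s.2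
      (s.1 + x, count)) (0, 0)
  st.2

-- ===== PORT B =====
def count_valid_alt (n : Int) (arr : List Int) : Int :=
  let total := arr.sum
  ((PySem.List.pyRange 0 n 1).map
    (fun i => if 2 * (PySem.List.slice arr none (some i)).sum + PySem.List.pyGetD arr i 0 ≥ total
              then (1 : Int) else 0)).sum

-- ===== PRECONDITION & SPEC =====
-- Pre_ excludes exactly the inputs where Python A raises IndexError (arr[i] with i ≥ len(arr), reached when n > len(arr)).
def Pre_count_valid (n : Int) (arr : List Int) : Prop := n ≤ (arr.length : Int)
instance (n : Int) (arr : List Int) : Decidable (Pre_count_valid n arr) := by unfold Pre_count_valid; infer_instance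
def pvWitness_count_valid : Int × List Int := (3, [1, 2, -1, 4])

def Spec_count_valid (n : Int) (arr : List Int) (out : Int) : Prop := out = count_valid_alt n arr
instance (n : Int) (arr : List Int) (out : Int) : Decidable (Spec_count_valid n arr out) := by unfold Spec_count_valid; infer_instance

-- ===== CLAIM (what is proved, stated in full; the proofs are below) =====
def Claim_equal_count_valid : Prop := ∀ (n : Int) (arr : List Int), Dom_count_valid n arr → Pre_count_valid n arr → Spec_count_valid n arr (count_valid n arr)

-- ===== LEMMAS AND PROOFS =====

-- Invariant: after the first k steps, A's (left_sum, count) state is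
-- ((arr.take k).sum, sum of B's 0/1 terms over the first k indices).
lemma count_valid_inv (arr : List Int) :
    ∀ (k : Nat), k ≤ arr.length →
      (PySem.List.pyRange 0 (k : Int) 1).foldl
        (fun (s : Int × Int) i =>
          let x := PySem.List.pyGetD arr i 0
          let right_sum := arr.sum - s.1 - x
          let count := if s.1 ≥ right_sum then s.2 + 1 else s.2
          (s.1 + x, count)) (0, 0)
      = ((arr.take k).sum,
         ((PySem.List.pyRange 0 (k : Int) 1).map
            (fun i => if 2 * (PySem.List.slice arr none (some i)).sum + PySem.List.pyGetD arr i 0 ≥ arr.sum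
                      then (1 : Int) else 0)).sum) := by
  intro k
  induction k with
  | zero => intro _; simp
  | succ k ih =>
    intro hk
    have hk' : k ≤ arr.length := Nat.le_of_succ_le hk
    have hklt : k < arr.length := hk
    have hcast : ((k + 1 : Nat) : Int) = (k : Int) + 1 := by push_cast; ring
    rw [hcast, PySem.List.pyRange_one_succ_right (by positivity), List.foldl_append,
        List.map_append, List.sum_append, ih hk']
    have hget : PySem.List.pyGetD arr (k : Int) 0 = arr[k] := by
      simp [PySem.List.pyGetD_natCast, List.getD_eq_getElem?_getD, hklt]
    have hslice : PySem.List.slice arr none (some (k : Int)) = arr.take k :=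
      PySem.List.slice_to_natCast arr k
    have htake : (arr.take (k + 1)).sum = (arr.take k).sum + arr[k] := by
      rw [List.take_add_one]
      simp [hklt]
    simp only [List.foldl_cons, List.foldl_nil, List.map_cons, List.map_nil, List.sum_cons,
      List.sum_nil, hget, hslice, htake]
    refine Prod.ext rfl ?_
    split_ifs <;> omega

theorem count_valid_spec : Claim_equal_count_valid := by
  intro n arr _ hpre
  simp only [Spec_count_valid, count_valid, count_valid_alt]
  by_cases hn : n ≤ 0
  · simp [PySem.List.pyRange_one_eq_nil hn]
  · push Not at hn
    have hn' : n = ((n.toNat : Nat) : Int) := by omega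
    have hlen : n.toNat ≤ arr.length := by
      unfold Pre_count_valid at hpre; omega
    rw [hn']
    rw [count_valid_inv arr n.toNat hlen]
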